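-- pv_equiv track=rewrite | github.com/LJ000003/- | 上位机程序/windows.py | analyze_cards
-- ===== SOURCE A (Python) =====
-- def analyze_cards(cards):
--     a, b, c = cards
--     if a == 0x00 and b == 0x00 and c == 0x00:
--         return 'all_zero', None, None
--     cnt = {}
--     for i, x in enumerate((a, b, c)):
--         if x not in cnt:
--             cnt[x] = []
--         cnt[x].append(i)
--     for k, pos in cnt.items():
--         if k != 0x00 and len(pos) == 3:
--             return 'triple', k, None
--     for k, pos in cnt.items():
--         if k != 0x00 and len(pos) == 2:
--             return 'pair', k, None
--     nonzero = [(i, x) for i, x in enumerate((a, b, c)) if x != 0x00]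
--     if len(nonzero) == 1:
--         idx, val = nonzero[0]
--         return 'single', val, idx
--     return 'none', None, None
-- ===== SOURCE B (Python) =====
-- def analyze_cards(cards):
--     a, b, c = cards
--     if a == b == c:
--         return ('all_zero', None, None) if a == 0 else ('triple', a, None)
--     if a == b and a != 0:
--         return 'pair', a, None
--     if a == c and a != 0:
--         return 'pair', a, None
--     if b == c and b != 0:
--         return 'pair', b, None
--     nz = [(i, x) for i, x in enumerate((a, b, c)) if x != 0]
--     if len(nz) == 1:
--         return 'single', nz[0][1], nz[0][0]
--     return 'none', None, None
-- ===== Notes on version B (the rewrite author's own statement) =====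
-- stated objective: simpler
-- what changed: Replaced the index-grouping dict plus the two scanning loops over its items by direct pairwise comparisons of the three unpacked cards (a==b==c for triple/all_zero, three pairwise tests for pair), keeping the comprehension-based single case.
import Mathlib
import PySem

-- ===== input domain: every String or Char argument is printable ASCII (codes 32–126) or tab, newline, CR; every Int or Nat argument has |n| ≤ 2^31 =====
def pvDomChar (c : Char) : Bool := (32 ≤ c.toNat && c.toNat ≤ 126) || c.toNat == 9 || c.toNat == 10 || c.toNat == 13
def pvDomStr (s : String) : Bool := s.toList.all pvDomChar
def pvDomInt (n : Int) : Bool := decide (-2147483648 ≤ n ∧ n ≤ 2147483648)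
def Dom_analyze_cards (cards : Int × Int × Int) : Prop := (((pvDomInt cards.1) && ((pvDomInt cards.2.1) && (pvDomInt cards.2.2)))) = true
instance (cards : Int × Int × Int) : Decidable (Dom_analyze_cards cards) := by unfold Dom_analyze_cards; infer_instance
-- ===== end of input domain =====

-- B replaces A's index-grouping dict and its two item-scanning loops by direct pairwise
-- comparisons of the three cards (objective: simpler).

-- ===== PORT A =====
-- loop body of A's grouping loop: 'if x not in cnt: cnt[x] = []' then 'cnt[x].append(i)'
def pvStep (d : PySem.Dict Int (List Int)) (p : Int × Int) : PySem.Dict Int (List Int) :=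
  let d' := if d.contains p.2 then d else d.insert p.2 []
  d'.modify p.2 [] (fun l => l ++ [p.1])

def analyze_cards (cards : Int × Int × Int) : String × Option Int × Option Int :=
  let a := cards.1
  let b := cards.2.1
  let c := cards.2.2
  if a = 0 ∧ b = 0 ∧ c = 0 then ("all_zero", none, none)
  else
    -- cnt = {}; for i, x in enumerate((a,b,c)): if x not in cnt: cnt[x] = []; cnt[x].append(i)
    let cnt : PySem.Dict Int (List Int) :=
      (PySem.List.enumerate [a, b, c]).foldl pvStep PySem.Dict.empty
    -- first for-loop with early return ('triple')
    match cnt.items.findSome? (fun p =>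
        if p.1 ≠ 0 ∧ p.2.length = 3
        then some (("triple", some p.1, none) : String × Option Int × Option Int) else none) with
    | some r => r
    | none =>
      -- second for-loop with early return ('pair')
      match cnt.items.findSome? (fun p =>
          if p.1 ≠ 0 ∧ p.2.length = 2
          then some (("pair", some p.1, none) : String × Option Int × Option Int) else none) with
      | some r => r
      | none =>
        let nonzero := (PySem.List.enumerate [a, b, c]).filter (fun p => p.2 != 0)
        match nonzero with
        | [(i, x)] => ("single", some x, some i)   -- len(nonzero) == 1
        | _ => ("none", none, none)

-- ===== PORT B =====
def analyze_cards_alt (cards : Int × Int × Int) : String × Option Int × Option Int :=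
  let a := cards.1
  let b := cards.2.1
  let c := cards.2.2
  if a = b ∧ b = c then
    if a = 0 then ("all_zero", none, none) else ("triple", some a, none)
  else if a = b ∧ a ≠ 0 then ("pair", some a, none)
  else if a = c ∧ a ≠ 0 then ("pair", some a, none)
  else if b = c ∧ b ≠ 0 then ("pair", some b, none)
  else
    let nz := (PySem.List.enumerate [a, b, c]).filter (fun p => p.2 != 0)
    if nz.length = 1 then ("single", some ((nz.headD (0, 0)).2), some ((nz.headD (0, 0)).1))
    else ("none", none, none)

-- ===== PRECONDITION & SPEC =====
def Spec_analyze_cards (cards : Int × Int × Int) (out : String × Option Int × Option Int) : Prop := out = analyze_cards_alt cards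
instance (cards : Int × Int × Int) (out : String × Option Int × Option Int) : Decidable (Spec_analyze_cards cards out) := by unfold Spec_analyze_cards; infer_instance

-- ===== CLAIM (what is proved, stated in full; the proofs are below) =====
def Claim_equal_analyze_cards : Prop := ∀ (cards : Int × Int × Int), Dom_analyze_cards cards → Spec_analyze_cards cards (analyze_cards cards)

-- ===== LEMMAS AND PROOFS =====
-- cnt.items evaluated once per equality pattern of the three cards

theorem pvItems_aaa (a : Int) :
    ((PySem.List.enumerate [a, a, a]).foldl pvStep PySem.Dict.empty).items
      = [(a, [0, 1, 2])] := by
  simp [PySem.List.enumerate, pvStep, PySem.Dict.empty, PySem.Dict.contains,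
    PySem.Dict.insert, PySem.Dict.modify, PySem.Dict.getD, PySem.Dict.get?, PySem.Dict.items]

theorem pvItems_aac (a c : Int) (h : a ≠ c) :
    ((PySem.List.enumerate [a, a, c]).foldl pvStep PySem.Dict.empty).items
      = [(a, [0, 1]), (c, [2])] := by
  simp [PySem.List.enumerate, pvStep, PySem.Dict.empty, PySem.Dict.contains,
    PySem.Dict.insert, PySem.Dict.modify, PySem.Dict.getD, PySem.Dict.get?, PySem.Dict.items, h, h.symm]

theorem pvItems_aba (a b : Int) (h : a ≠ b) :
    ((PySem.List.enumerate [a, b, a]).foldl pvStep PySem.Dict.empty).items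
      = [(a, [0, 2]), (b, [1])] := by
  simp [PySem.List.enumerate, pvStep, PySem.Dict.empty, PySem.Dict.contains,
    PySem.Dict.insert, PySem.Dict.modify, PySem.Dict.getD, PySem.Dict.get?, PySem.Dict.items, h, h.symm]

theorem pvItems_abb (a b : Int) (h : a ≠ b) :
    ((PySem.List.enumerate [a, b, b]).foldl pvStep PySem.Dict.empty).items
      = [(a, [0]), (b, [1, 2])] := by
  simp [PySem.List.enumerate, pvStep, PySem.Dict.empty, PySem.Dict.contains,
    PySem.Dict.insert, PySem.Dict.modify, PySem.Dict.getD, PySem.Dict.get?, PySem.Dict.items, h, h.symm]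

theorem pvItems_abc (a b c : Int) (hab : a ≠ b) (hac : a ≠ c) (hbc : b ≠ c) :
    ((PySem.List.enumerate [a, b, c]).foldl pvStep PySem.Dict.empty).items
      = [(a, [0]), (b, [1]), (c, [2])] := by
  simp [PySem.List.enumerate, pvStep, PySem.Dict.empty, PySem.Dict.contains,
    PySem.Dict.insert, PySem.Dict.modify, PySem.Dict.getD, PySem.Dict.get?, PySem.Dict.items,
    hab, hab.symm, hac, hac.symm, hbc, hbc.symm]

-- ===== VERDICT (by name: the statement is the Claim_ definition above) =====
theorem analyze_cards_spec : Claim_equal_analyze_cards := by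
  intro cards _
  obtain ⟨a, b, c⟩ := cards
  unfold Spec_analyze_cards
  simp only [analyze_cards, analyze_cards_alt]
  by_cases hab : a = b <;> by_cases hbc : b = c
  · subst hab; subst hbc
    rw [pvItems_aaa]
    by_cases ha : a = 0 <;>
      simp [List.findSome?, PySem.List.enumerate, bne_iff_ne, List.headD, List.head?, ha]
  · subst hab
    rw [pvItems_aac a c hbc]
    by_cases ha : a = 0 <;> by_cases hc : c = 0 <;>
      simp_all [List.findSome?, PySem.List.enumerate, bne_iff_ne, List.headD, List.head?]
  · subst hbc
    rw [pvItems_abb a b hab]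
    by_cases ha : a = 0 <;> by_cases hb : b = 0 <;>
      simp_all [List.findSome?, PySem.List.enumerate, bne_iff_ne, List.headD, List.head?]
  · by_cases hac : a = c
    · subst hac
      rw [pvItems_aba a b hab]
      by_cases ha : a = 0 <;> by_cases hb : b = 0 <;>
        simp_all [List.findSome?, PySem.List.enumerate, bne_iff_ne, List.headD, List.head?]
    · rw [pvItems_abc a b c hab hac hbc]
      by_cases ha : a = 0 <;> by_cases hb : b = 0 <;> by_cases hc : c = 0 <;>
        simp_all [List.findSome?, PySem.List.enumerate, bne_iff_ne, List.headD, List.head?]
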